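-- pv_equiv track=rewrite | github.com/ibtSdan/1Day1Problem | 프로그래머스/2/12973. 짝지어 제거하기/짝지어 제거하기.py | solution
-- ===== SOURCE A (Python) =====
-- def solution(s):
--     a = []
--     for i in range(len(s)):
--         a.append(s[i])
--         while len(a)>=2 and a[-1] == a[-2]:
--             a.pop()
--             a.pop()
--     return 1 if not a else 0
-- ===== SOURCE B (Python) =====
-- def solution(s):
--     t = s
--     while True:
--         out = []
--         i = 0
--         n = len(t)
--         while i < n:
--             if i + 1 < n and t[i] == t[i + 1]:
--                 i += 2
--             else:
--                 out.append(t[i])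
--                 i += 1
--         u = ''.join(out)
--         if u == t:
--             break
--         t = u
--     return 1 if t == '' else 0
-- ===== Notes on version B (the rewrite author's own statement) =====
-- stated objective: alternative
-- what changed: Replaces the single linear stack sweep with repeated full left-to-right passes that each delete every disjoint adjacent equal pair, iterating until a pass changes nothing; correctness rests on confluence of adjacent-pair cancellation.
import Mathlib
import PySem

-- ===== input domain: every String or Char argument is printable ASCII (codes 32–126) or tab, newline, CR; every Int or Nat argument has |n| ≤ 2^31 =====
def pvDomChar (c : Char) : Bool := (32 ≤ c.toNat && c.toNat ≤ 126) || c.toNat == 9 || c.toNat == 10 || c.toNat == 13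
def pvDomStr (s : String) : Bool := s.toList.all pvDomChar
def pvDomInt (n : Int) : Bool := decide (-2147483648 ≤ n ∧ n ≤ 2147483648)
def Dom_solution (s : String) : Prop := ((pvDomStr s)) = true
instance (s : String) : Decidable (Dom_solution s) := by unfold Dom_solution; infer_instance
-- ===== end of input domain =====

-- B replaces A's single stack sweep by repeated whole-string passes deleting adjacent equal
-- pairs until a pass changes nothing (alternative decomposition, not claimed faster).

-- ===== PORT A =====
-- A's inner `while len(a)>=2 and a[-1]==a[-2]: a.pop(); a.pop()` (a[-2] = last of dropLast; exact for len ≥ 2, and for len < 2 the conjunction is false exactly like Python's short-circuit).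
def whileCancel (a : List Char) : List Char :=
  if h : 2 ≤ a.length ∧ a.getLast? = a.dropLast.getLast? then
    whileCancel a.dropLast.dropLast
  else a
termination_by a.length
decreasing_by simp only [List.length_dropLast]; omega

def solution (s : String) : Int :=
  let a := s.toList.foldl (fun a c => whileCancel (a ++ [c])) []
  if a = [] then 1 else 0

-- ===== PORT B =====
-- one left-to-right pass of Source B's inner `while i < n` loop: skip a pair, or keep one char
def pass1 : List Char → List Char
  | a :: b :: rest => if a = b then pass1 rest else a :: pass1 (b :: rest)
  | l => l

theorem pass1_length_le : ∀ l : List Char, (pass1 l).length ≤ l.length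
  | [] => by simp [pass1]
  | [a] => by simp [pass1]
  | a :: b :: rest => by
    simp only [pass1]
    split
    · have := pass1_length_le rest; simp; omega
    · have := pass1_length_le (b :: rest); simp at this ⊢; omega

theorem pass1_lt : ∀ l : List Char, pass1 l ≠ l → (pass1 l).length < l.length
  | [] => by simp [pass1]
  | [a] => by simp [pass1]
  | a :: b :: rest => by
    intro h
    by_cases hab : a = b
    · simp only [pass1, if_pos hab]
      have := pass1_length_le rest; simp; omega
    · simp only [pass1, if_neg hab] at h ⊢
      simp only [List.length_cons]
      have hne : pass1 (b :: rest) ≠ b :: rest := by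
        intro he; exact h (by simp [he])
      have := pass1_lt (b :: rest) hne
      simp at this; omega

-- Source B's outer `while True` loop: repeat passes until a pass changes nothing
def loopB (t : List Char) : List Char :=
  let u := pass1 t
  if h : u = t then t else loopB u
termination_by t.length
decreasing_by exact pass1_lt t h

def solution_alt (s : String) : Int :=
  if loopB s.toList = [] then 1 else 0

-- ===== PRECONDITION & SPEC =====
def Spec_solution (s : String) (out : Int) : Prop := out = solution_alt s
instance (s : String) (out : Int) : Decidable (Spec_solution s out) := by unfold Spec_solution; infer_instance

-- ===== CLAIM (what is proved, stated in full; the proofs are below) =====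
def Claim_equal_solution : Prop := ∀ (s : String), Dom_solution s → Spec_solution s (solution s)

-- ===== LEMMAS AND PROOFS =====

-- head-style stack push with single cancellation (proof-side model of A's loop body)
def push (st : List Char) (c : Char) : List Char :=
  match st with
  | d :: rest => if d = c then rest else c :: d :: rest
  | [] => [c]

-- irreducibility: no two adjacent equal characters
def Irr : List Char → Prop
  | a :: b :: r => a ≠ b ∧ Irr (b :: r)
  | _ => True

theorem irr_nil : Irr [] := trivial

theorem irr_tail : ∀ {a : Char} {r : List Char}, Irr (a :: r) → Irr r
  | _, [], _ => trivial
  | _, _ :: _, h => h.2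

theorem irr_head_ne : ∀ {a : Char} {r : List Char}, Irr (a :: r) →
    ∀ b, r.head? = some b → a ≠ b
  | _, _ :: _, h, _, rfl => h.1

theorem irr_cons {a : Char} {r : List Char} (h : Irr r)
    (hh : ∀ b, r.head? = some b → a ≠ b) : Irr (a :: r) := by
  match r with
  | [] => trivial
  | b :: r2 => exact ⟨hh b rfl, h⟩

theorem push_irr (st : List Char) (c : Char) (h : Irr st) : Irr (push st c) := by
  cases st with
  | nil => exact trivial
  | cons d rest =>
    simp only [push]
    split
    · exact irr_tail h
    · rename_i hdc
      exact ⟨fun he => hdc he.symm, h⟩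

theorem whileCancel_irr : ∀ st : List Char, Irr st → whileCancel st.reverse = st.reverse := by
  intro st h
  rw [whileCancel]
  split
  · rename_i hc
    exfalso
    match st, h with
    | [], _ => simp at hc
    | [a], _ => simp at hc
    | a :: b :: r, h =>
      have hab : a ≠ b := h.1
      have h1 : ((a :: b :: r).reverse).getLast? = some a := by simp
      have h2 : ((a :: b :: r).reverse).dropLast.getLast? = some b := by
        simp [List.dropLast_concat]
      rw [h1, h2] at hc
      exact hab (by simpa using hc.2)
  · rfl

theorem whileCancel_step (st : List Char) (c : Char) (h : Irr st) :
    whileCancel (st.reverse ++ [c]) = (push st c).reverse := by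
  rw [whileCancel]
  split
  · rename_i hc
    match st, h with
    | [], _ => simp at hc
    | d :: rest, h =>
      have hlast : ((d :: rest).reverse ++ [c]).getLast? = some c := by simp
      have hdl : ((d :: rest).reverse ++ [c]).dropLast = (d :: rest).reverse := by
        simp [List.dropLast_concat]
      rw [hlast, hdl] at hc
      have hdc : d = c := by simpa using hc.2.symm
      have heq : ((d :: rest).reverse ++ [c]).dropLast.dropLast = rest.reverse := by
        simp [List.dropLast_concat]
      rw [heq, whileCancel_irr rest (irr_tail h)]
      simp [push, hdc]
  · rename_i hc
    match st with
    | [] => simp [push]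
    | d :: rest =>
      have hdc : ¬ d = c := by
        intro he
        apply hc
        refine ⟨by simp, ?_⟩
        simp [List.dropLast_concat, he]
      simp [push, hdc]

theorem foldA_eq : ∀ (l : List Char) (st : List Char), Irr st →
    l.foldl (fun a c => whileCancel (a ++ [c])) st.reverse = (l.foldl push st).reverse := by
  intro l
  induction l with
  | nil => intro st _; rfl
  | cons c l ih =>
    intro st h
    simp only [List.foldl_cons]
    rw [whileCancel_step st c h]
    exact ih (push st c) (push_irr st c h)

theorem push_push_cancel (st : List Char) (c : Char) (h : Irr st) :
    push (push st c) c = st := by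
  match st, h with
  | [], _ => simp [push]
  | d :: rest, h =>
    by_cases hdc : d = c
    · subst hdc
      simp only [push, if_pos rfl]
      match rest, h with
      | [], _ => simp [push]
      | e :: r2, h =>
        have hde : d ≠ e := h.1
        have : ¬ e = d := fun he => hde he.symm
        simp [push, this]
    · simp [push, hdc]

theorem foldl_push_pass : ∀ (n : ℕ) (l : List Char), l.length ≤ n → ∀ st : List Char, Irr st →
    (pass1 l).foldl push st = l.foldl push st := by
  intro n
  induction n with
  | zero =>
    intro l hl st _
    match l, hl with
    | [], _ => rfl
  | succ n ih =>
    intro l hl st hst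
    match l with
    | [] => rfl
    | [a] => rfl
    | a :: b :: rest =>
      simp only [pass1]
      split
      · rename_i hab
        subst hab
        rw [ih rest (by simp at hl; omega) st hst]
        simp only [List.foldl_cons]
        rw [push_push_cancel st a hst]
      · simp only [List.foldl_cons]
        exact ih (b :: rest) (by simp at hl ⊢; omega) (push st a) (push_irr st a hst)

theorem pass1_fix_irr : ∀ l : List Char, pass1 l = l → Irr l
  | [] => fun _ => trivial
  | [_] => fun _ => trivial
  | a :: b :: rest => by
    intro h
    simp only [pass1] at h
    split at h
    · exfalso
      have := pass1_length_le rest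
      have := congrArg List.length h
      simp at this; omega
    · rename_i hab
      have htl : pass1 (b :: rest) = b :: rest := by
        have := congrArg List.tail h; simpa using this
      exact ⟨hab, pass1_fix_irr (b :: rest) htl⟩

theorem foldl_push_irr : ∀ (m st : List Char), Irr st → Irr m →
    (∀ c, m.head? = some c → st.head? ≠ some c) →
    m.foldl push st = m.reverse ++ st := by
  intro m
  induction m with
  | nil => intro st _ _ _; simp
  | cons c rest ih =>
    intro st hst hm hhd
    have hpush : push st c = c :: st := by
      match st with
      | [] => rfl
      | d :: r =>
        have : ¬ d = c := by
          intro he; exact hhd c rfl (by simp [he])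
        simp [push, this]
    simp only [List.foldl_cons, hpush]
    rw [ih (c :: st)
        (irr_cons hst (by intro b hb he; subst he; exact hhd c rfl hb))
        (irr_tail hm)
        (by intro e he hce; simp at hce; exact irr_head_ne hm e he hce)]
    simp

theorem loopB_pass : ∀ (n : ℕ) (l : List Char), l.length ≤ n →
    pass1 (loopB l) = loopB l ∧ (loopB l).foldl push [] = l.foldl push [] := by
  intro n
  induction n with
  | zero =>
    intro l hl
    match l, hl with
    | [], _ =>
      have h0 : loopB [] = [] := by rw [loopB]; simp [pass1]
      rw [h0]
      exact ⟨rfl, rfl⟩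
  | succ n ih =>
    intro l hl
    rw [loopB]
    split
    · rename_i h; exact ⟨h, rfl⟩
    · rename_i h
      have hlen := pass1_lt l h
      have hp := ih (pass1 l) (by omega)
      refine ⟨hp.1, ?_⟩
      rw [hp.2]
      exact foldl_push_pass l.length l le_rfl [] irr_nil

theorem loopB_empty_iff (l : List Char) : loopB l = [] ↔ l.foldl push [] = [] := by
  obtain ⟨hfix, hred⟩ := loopB_pass l.length l le_rfl
  constructor
  · intro h
    rw [← hred, h]
    rfl
  · intro h
    have hirr := pass1_fix_irr _ hfix
    have hrev := foldl_push_irr (loopB l) [] irr_nil hirr (by simp)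
    rw [hred, h] at hrev
    have : (loopB l).reverse = [] := by simpa using hrev.symm
    simpa using this

-- ===== VERDICT (by name: the statement is the Claim_ definition above) =====
theorem solution_spec : Claim_equal_solution := by
  intro s _
  unfold Spec_solution solution solution_alt
  have hA := foldA_eq s.toList [] irr_nil
  simp only [List.reverse_nil] at hA
  rw [hA]
  have hiff := loopB_empty_iff s.toList
  by_cases h : s.toList.foldl push [] = []
  · simp [h, hiff.mpr h]
  · have hl : loopB s.toList ≠ [] := fun he => h (hiff.mp he)
    simp [h, hl]
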